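-- pv_equiv track=rewrite | github.com/tansonlee/PyScript | parsing/split_program.py | my_find
-- ===== SOURCE A (Python) =====
-- def my_find(string, key, start):
--     string = string[start:]
--     ignore = False
--     for i in range(len(string)):
--         if string[i] == "`":
--             ignore = not ignore
--
--         if ignore:
--             continue
--
--         if string[i:i + len(key)] == key:
--             return start + i
--
--     return len(string) - 1
-- ===== SOURCE B (Python) =====
-- def my_find(string, key, start):
--     s = string[start:]
--     n = len(s)
--     ticks = 0  # number of backticks in s[:pos]
--     pos = 0
--     while pos < n:
--         i = s.find(key, pos)
--         if i == -1:
--             break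
--         ticks += s[pos:i + 1].count("`")
--         if ticks % 2 == 0:
--             return start + i
--         pos = i + 1
--     return n - 1
-- ===== Notes on version B (the rewrite author's own statement) =====
-- stated objective: faster
-- what changed: Replaces A's per-character scan with repeated str.find jumps to each occurrence of key, maintaining a running backtick count over the skipped span to test parity only at candidate positions.
import Mathlib
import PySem

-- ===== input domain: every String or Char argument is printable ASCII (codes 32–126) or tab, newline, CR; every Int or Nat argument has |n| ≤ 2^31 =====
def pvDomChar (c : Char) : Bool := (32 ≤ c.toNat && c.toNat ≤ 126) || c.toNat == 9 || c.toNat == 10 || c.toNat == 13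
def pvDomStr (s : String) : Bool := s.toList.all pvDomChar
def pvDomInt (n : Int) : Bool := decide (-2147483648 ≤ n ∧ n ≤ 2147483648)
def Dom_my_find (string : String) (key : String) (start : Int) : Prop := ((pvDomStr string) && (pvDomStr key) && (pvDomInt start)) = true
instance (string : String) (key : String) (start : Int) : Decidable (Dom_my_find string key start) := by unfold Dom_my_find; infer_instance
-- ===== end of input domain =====

-- B replaces A's per-character scan by find-jumps with a running backtick count; same return value, no side effects.

-- ===== PORT A =====
-- A's for-i-in-range loop: toggle on backtick, skip while inside, compare the slice to key
def myFindGoA (s key : List Char) (start : Int) (i : Nat) (ignore : Bool) : Int :=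
  if h : i < s.length then
    let ignore' := if s[i] == '`' then !ignore else ignore
    if ignore' then myFindGoA s key start (i+1) ignore'
    else if PySem.List.slice s (some (i : Int)) (some ((i : Int) + key.length)) == key then
      start + i
    else myFindGoA s key start (i+1) ignore'
  else (s.length : Int) - 1
termination_by s.length - i

def my_find (string : String) (key : String) (start : Int) : Int :=
  let s := PySem.List.slice string.toList (some start) none   -- string = string[start:]
  myFindGoA s key.toList start 0 false

-- ===== PORT B =====
-- B's while loop: jump with find, keep the running backtick count `ticks`
def myFindGoB (s key : List Char) (start : Int) (pos ticks : Nat) : Int :=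
  if h : pos < s.length then
    let i := PySem.Chars.findFrom s key (pos : Int) none
    if hi : i = -1 then (s.length : Int) - 1
    else
      let ticks' := ticks + (PySem.List.slice s (some (pos : Int)) (some (i + 1))).count '`'
      if ticks' % 2 = 0 then start + i
      else myFindGoB s key start (i.toNat + 1) ticks'
  else (s.length : Int) - 1
termination_by s.length - pos
decreasing_by
  have h1 := (PySem.Chars.findFrom_natCast_spec s key pos (Nat.le_of_lt h) hi).1
  omega

def my_find_alt (string : String) (key : String) (start : Int) : Int :=
  let s := PySem.List.slice string.toList (some start) none   -- s = string[start:]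
  myFindGoB s key.toList start 0 0

-- ===== PRECONDITION & SPEC =====
def Spec_my_find (string : String) (key : String) (start : Int) (out : Int) : Prop := out = my_find_alt string key start
instance (string : String) (key : String) (start : Int) (out : Int) : Decidable (Spec_my_find string key start out) := by unfold Spec_my_find; infer_instance

-- ===== CLAIM (what is proved, stated in full; the proofs are below) =====
def Claim_equal_my_find : Prop := ∀ (string : String) (key : String) (start : Int), Dom_my_find string key start → Spec_my_find string key start (my_find string key start)

-- ===== LEMMAS AND PROOFS =====

-- "index j is active (even backtick parity up to and including j) and key matches at j"
def pvGoodb (s key : List Char) (j : Nat) : Bool :=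
  ((s.take (j+1)).count '`' % 2 == 0) && decide (key <+: s.drop j)

-- reference form: first good index ≥ i, else len - 1
def pvSpecGo (s key : List Char) (start : Int) (i : Nat) : Int :=
  if i < s.length then
    if pvGoodb s key i then start + i else pvSpecGo s key start (i+1)
  else (s.length : Int) - 1
termination_by s.length - i

theorem pvSpecGo_stop (s key : List Char) (start : Int) (i : Nat) (h : ¬ i < s.length) :
    pvSpecGo s key start i = (s.length : Int) - 1 := by
  unfold pvSpecGo; simp [h]

theorem pvSpecGo_skip (s key : List Char) (start : Int) (a b : Nat) (hab : a ≤ b)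
    (hbad : ∀ j, a ≤ j → j < b → pvGoodb s key j = false) :
    pvSpecGo s key start a = pvSpecGo s key start b := by
  induction b with
  | zero => have : a = 0 := by omega
            rw [this]
  | succ b ih =>
    rcases Nat.lt_or_ge a (b+1) with hlt | hge
    · have hab' : a ≤ b := by omega
      rw [ih hab' (fun j hj1 hj2 => hbad j hj1 (by omega))]
      by_cases hb : b < s.length
      · rw [pvSpecGo]
        simp [hb, hbad b hab' (by omega)]
      · rw [pvSpecGo_stop s key start b hb, pvSpecGo_stop s key start (b+1) (by omega)]
    · have : a = b + 1 := by omega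
      rw [this]

theorem pvSpecGo_none (s key : List Char) (start : Int) (i : Nat)
    (hbad : ∀ j, i ≤ j → j < s.length → pvGoodb s key j = false) :
    pvSpecGo s key start i = (s.length : Int) - 1 := by
  rcases Nat.lt_or_ge i s.length with h | h
  · rw [pvSpecGo_skip s key start i s.length (Nat.le_of_lt h) (fun j hj1 hj2 => hbad j hj1 hj2)]
    exact pvSpecGo_stop s key start s.length (by omega)
  · exact pvSpecGo_stop s key start i (by omega)

-- counting backticks one character further
theorem pvCount_take_succ (s : List Char) (i : Nat) (h : i < s.length) :
    (s.take (i+1)).count '`' = (s.take i).count '`' + (if s[i] = '`' then 1 else 0) := by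
  rw [List.take_add_one, List.count_append]
  simp [List.getElem?_eq_getElem h]
  by_cases hc : s[i] = '`' <;> simp [hc]

-- the slice test of A is the prefix test
theorem pvSlice_eq_key_iff (s key : List Char) (i : Nat) :
    (PySem.List.slice s (some (i : Int)) (some ((i : Int) + key.length)) == key) = true
      ↔ key <+: s.drop i := by
  rw [PySem.List.slice_natCast_add, beq_iff_eq, List.prefix_iff_eq_take]
  exact eq_comm

theorem pvA_eq_spec_aux (s key : List Char) (start : Int) :
    ∀ (d i : Nat) (ignore : Bool), s.length ≤ i + d →
    ignore = (((s.take i).count '`' % 2) == 1) →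
    myFindGoA s key start i ignore = pvSpecGo s key start i := by
  intro d
  induction d with
  | zero =>
    intro i ignore hd _
    rw [myFindGoA, pvSpecGo_stop s key start i (by omega)]
    simp [show ¬ i < s.length by omega]
  | succ d ih =>
    intro i ignore hd hinv
    by_cases h : i < s.length
    · have hcnt := pvCount_take_succ s i h
      have hinv' : (if s[i] == '`' then !ignore else ignore)
          = (((s.take (i+1)).count '`' % 2) == 1) := by
        by_cases hc : s[i] = '`'
        · simp only [hc, beq_self_eq_true, if_pos, hinv, hcnt]
          rcases Nat.mod_two_eq_zero_or_one ((s.take i).count '`') with hr | hr <;>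
            simp [Nat.add_mod, hr]
        · have : (s[i] == '`') = false := by simp [hc]
          simp only [this, Bool.false_eq_true, hinv, hcnt]
          simp [hc]
      rw [myFindGoA, pvSpecGo]
      simp only [dif_pos h, if_pos h]
      rw [show (if s[i] == '`' then !ignore else ignore) = (((s.take (i+1)).count '`' % 2) == 1) from hinv']
      by_cases hig : (((s.take (i+1)).count '`' % 2) == 1) = true
      · -- ignore' true: index inactive
        have hgood : pvGoodb s key i = false := by
          unfold pvGoodb
          rcases Nat.mod_two_eq_zero_or_one ((s.take (i+1)).count '`') with hr | hr <;>
            simp [hr] at hig ⊢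
        rw [hig]
        simp only [hgood, Bool.false_eq_true]
        exact ih (i+1) true (by omega) hig.symm
      · have hig' : (((s.take (i+1)).count '`' % 2) == 1) = false := by
          simpa using hig
        rw [hig']
        simp only [Bool.false_eq_true, if_false]
        by_cases hm : (PySem.List.slice s (some (i : Int)) (some ((i : Int) + key.length)) == key) = true
        · have hgood : pvGoodb s key i = true := by
            unfold pvGoodb
            rcases Nat.mod_two_eq_zero_or_one ((s.take (i+1)).count '`') with hr | hr
            · simp [hr, (pvSlice_eq_key_iff s key i).mp hm]
            · simp [hr] at hig'
          simp [hm, hgood]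
        · have hgood : pvGoodb s key i = false := by
            unfold pvGoodb
            have : ¬ key <+: s.drop i := fun hp => hm ((pvSlice_eq_key_iff s key i).mpr hp)
            simp [this]
          simp only [hm, Bool.false_eq_true, hgood, if_false]
          exact ih (i+1) false (by omega) hig'.symm
    · rw [myFindGoA, pvSpecGo_stop s key start i h]
      simp [h]
  -- end

theorem pvDrop_prefix_infix (s key : List Char) (pos j : Nat) (hpj : pos ≤ j)
    (hp : key <+: s.drop j) : key <:+: s.drop pos := by
  have hd : s.drop j = (s.drop pos).drop (j - pos) := by
    rw [List.drop_drop]; congr 1; omega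
  have hsuf : s.drop j <:+ s.drop pos := hd ▸ List.drop_suffix _ _
  exact hp.isInfix.trans hsuf.isInfix

theorem pvB_eq_spec_aux (s key : List Char) (start : Int) :
    ∀ (d pos ticks : Nat), s.length ≤ pos + d → pos ≤ s.length →
    ticks % 2 = (s.take pos).count '`' % 2 →
    myFindGoB s key start pos ticks = pvSpecGo s key start pos := by
  intro d
  induction d with
  | zero =>
    intro pos ticks hd _ _
    rw [myFindGoB, pvSpecGo_stop s key start pos (by omega)]
    simp [show ¬ pos < s.length by omega]
  | succ d ih =>
    intro pos ticks hd hpos hinv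
    by_cases h : pos < s.length
    · rw [myFindGoB]
      simp only [dif_pos h]
      by_cases hi : PySem.Chars.findFrom s key ((pos : Nat) : Int) none = -1
      · rw [dif_pos hi]
        have hninf : ¬ key <:+: s.drop pos :=
          (PySem.Chars.findFrom_natCast_eq_neg_one_iff s key pos (Nat.le_of_lt h)).mp hi
        rw [pvSpecGo_none s key start pos ?_]
        intro j hj1 hj2
        unfold pvGoodb
        have hnp : ¬ key <+: s.drop j := fun hp => hninf (pvDrop_prefix_infix s key pos j hj1 hp)
        simp [hnp]
      · rw [dif_neg hi]
        obtain ⟨hple, hpref, hmin⟩ :=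
          PySem.Chars.findFrom_natCast_spec s key pos (Nat.le_of_lt h) hi
        set i := PySem.Chars.findFrom s key ((pos : Nat) : Int) none with hidef
        have h0 : (0:Int) ≤ i := le_trans (Int.natCast_nonneg pos) hple
        have hiI : i = (i.toNat : Int) := (Int.toNat_of_nonneg h0).symm
        set iN := i.toNat with hiNdef
        -- i = pos + find (s.drop pos) key, hence iN ≤ s.length
        have hif : i = if PySem.Chars.find (s.drop pos) key = -1 then -1
            else (pos : Int) + PySem.Chars.find (s.drop pos) key := by
          rw [hidef, PySem.Chars.findFrom_natCast s key pos (Nat.le_of_lt h)]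
        have hfne : PySem.Chars.find (s.drop pos) key ≠ -1 := by
          intro hf; rw [if_pos hf] at hif; exact hi (hidef ▸ hif)
        rw [if_neg hfne] at hif
        have hfl := PySem.Chars.find_le_length (s.drop pos) key
        rw [List.length_drop] at hfl
        have hiNle : iN ≤ s.length := by omega
        -- iN < s.length
        have hiNlt : iN < s.length := by
          rcases eq_or_ne key [] with hk | hk
          · rw [hk, PySem.Chars.find_nil] at hif
            omega
          · by_contra hge
            have hdrop : s.drop iN = [] := List.drop_eq_nil_iff.mpr (by omega)
            rw [hdrop] at hpref
            exact hk (List.prefix_nil.mp hpref)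
        -- the counted slice
        have hslice : PySem.List.slice s (some ((pos : Nat) : Int)) (some (i + 1))
            = (s.drop pos).take (iN + 1 - pos) := by
          rw [hiI, show ((iN : Int) + 1) = (((iN + 1 : Nat)) : Int) by push_cast; ring]
          exact PySem.List.slice_natCast s pos (iN + 1)
        rw [hslice]
        have hcnt : (s.take pos).count '`' + ((s.drop pos).take (iN + 1 - pos)).count '`'
            = (s.take (iN + 1)).count '`' := by
          conv_rhs => rw [show iN + 1 = pos + (iN + 1 - pos) by omega, List.take_add,
            List.count_append]
        by_cases ht : (ticks + ((s.drop pos).take (iN + 1 - pos)).count '`') % 2 = 0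
        · rw [if_pos ht]
          have hpar : (s.take (iN + 1)).count '`' % 2 = 0 := by omega
          have hgood : pvGoodb s key iN = true := by
            unfold pvGoodb
            simp [hpar, hpref]
          rw [pvSpecGo_skip s key start pos iN (by omega) ?_]
          · rw [pvSpecGo]
            simp [hiNlt, hgood, hiI]
          · intro j hj1 hj2
            unfold pvGoodb
            simp [hmin j hj1 hj2]
        · rw [if_neg ht]
          have hpar : (s.take (iN + 1)).count '`' % 2 = 1 := by omega
          have hgood : pvGoodb s key iN = false := by
            unfold pvGoodb
            simp [hpar]
          rw [pvSpecGo_skip s key start pos iN (by omega) ?_]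
          · rw [pvSpecGo]
            simp only [hiNlt, if_pos, hgood, Bool.false_eq_true, if_false]
            exact ih (iN + 1) _ (by omega) (by omega) (by omega)
          · intro j hj1 hj2
            unfold pvGoodb
            simp [hmin j hj1 hj2]
    · rw [myFindGoB, pvSpecGo_stop s key start pos h]
      simp [h]

-- ===== VERDICT (by name: the statement is the Claim_ definition above) =====
theorem my_find_spec : Claim_equal_my_find := by
  intro string key start _
  unfold Spec_my_find my_find my_find_alt
  rw [pvA_eq_spec_aux _ _ _ (PySem.List.slice string.toList (some start) none).length 0 false
        (by omega) (by simp),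
      pvB_eq_spec_aux _ _ _ (PySem.List.slice string.toList (some start) none).length 0 0
        (by omega) (by omega) (by simp)]
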